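-- pv_equiv track=rewrite | github.com/paiml/depyler | examples/hard_histogram_analysis.py | cumulative_histogram
-- ===== SOURCE A (Python) =====
-- def cumulative_histogram(histogram: list[int]) -> list[int]:
--     """Convert a histogram to a cumulative histogram."""
--     result: list[int] = []
--     running: int = 0
--     i: int = 0
--     while i < len(histogram):
--         running = running + histogram[i]
--         result.append(running)
--         i = i + 1
--     return result
-- ===== SOURCE B (Python) =====
-- def cumulative_histogram(histogram: list[int]) -> list[int]:
--     """Divide-and-conquer prefix sums: solve each half, offset the right half."""
--
--     def go(seg: list[int]) -> list[int]:
--         if len(seg) <= 1: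
--             return list(seg)
--         mid = len(seg) // 2
--         left = go(seg[:mid])
--         right = go(seg[mid:])
--         off = left[-1]
--         return left + [off + x for x in right]
--
--     return go(histogram)
-- ===== Notes on version B (the rewrite author's own statement) =====
-- stated objective: alternative
-- what changed: Replaced the single-pass running-total loop by a divide-and-conquer recursion that computes prefix sums of each half and adds the left half's total to the right half.
import Mathlib
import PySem

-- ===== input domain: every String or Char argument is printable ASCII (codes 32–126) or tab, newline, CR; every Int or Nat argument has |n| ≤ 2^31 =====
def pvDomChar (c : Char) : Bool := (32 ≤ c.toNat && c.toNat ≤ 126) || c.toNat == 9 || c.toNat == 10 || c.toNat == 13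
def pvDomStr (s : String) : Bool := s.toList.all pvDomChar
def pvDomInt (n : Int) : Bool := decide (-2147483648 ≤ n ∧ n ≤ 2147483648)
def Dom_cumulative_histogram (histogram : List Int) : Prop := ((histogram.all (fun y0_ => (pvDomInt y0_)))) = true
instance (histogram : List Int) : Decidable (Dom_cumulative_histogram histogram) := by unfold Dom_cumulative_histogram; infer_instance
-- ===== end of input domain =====

-- B replaces A's running-total loop with a divide-and-conquer recursion (prefix sums of each half, left total added to the right half); objective: alternative.

-- ===== PORT A =====
-- while i < len(histogram): running += histogram[i]; result.append(running); i += 1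
def cumulative_histogram (histogram : List Int) : List Int :=
  ((List.range histogram.length).foldl
    (fun (st : List Int × Int) i =>
      let running := st.2 + histogram.getD i 0   -- histogram[i], i always in range
      (st.1 ++ [running], running))
    ([], 0)).1

-- ===== PORT B =====
-- def go(seg): if len(seg) <= 1: return list(seg); mid = len(seg)//2;
--   left = go(seg[:mid]); right = go(seg[mid:]); off = left[-1];
--   return left + [off + x for x in right]
def cumulativeGo (seg : List Int) : List Int :=
  if seg.length ≤ 1 then seg
  else
    let mid := seg.length / 2
    let left := cumulativeGo (seg.take mid)
    let right := cumulativeGo (seg.drop mid)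
    let off := left.getLastD 0   -- left[-1]; left is nonempty here since mid ≥ 1
    left ++ right.map (fun x => off + x)
termination_by seg.length
decreasing_by
  · simp only [List.length_take]; omega
  · simp only [List.length_drop]; omega

def cumulative_histogram_alt (histogram : List Int) : List Int :=
  cumulativeGo histogram

-- ===== PRECONDITION & SPEC =====
def Spec_cumulative_histogram (histogram : List Int) (out : List Int) : Prop := out = cumulative_histogram_alt histogram
instance (histogram : List Int) (out : List Int) : Decidable (Spec_cumulative_histogram histogram out) := by unfold Spec_cumulative_histogram; infer_instance

-- ===== CLAIM (what is proved, stated in full; the proofs are below) =====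
def Claim_equal_cumulative_histogram : Prop := ∀ (histogram : List Int), Dom_cumulative_histogram histogram → Spec_cumulative_histogram histogram (cumulative_histogram histogram)

-- ===== LEMMAS AND PROOFS =====

-- Canonical left-to-right scan; both ports are proved equal to `cum h 0`.
def cum : List Int → Int → List Int
  | [], _ => []
  | x :: t, acc => (acc + x) :: cum t (acc + x)

theorem cum_append (a b : List Int) (acc : Int) :
    cum (a ++ b) acc = cum a acc ++ cum b (acc + a.sum) := by
  induction a generalizing acc with
  | nil => simp [cum]
  | cons x t ih =>
    simp only [List.cons_append, cum, ih, List.sum_cons]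
    have : acc + x + t.sum = acc + (x + t.sum) := by ring
    rw [this]

theorem cum_shift (l : List Int) (a b : Int) :
    cum l (a + b) = (cum l b).map (fun x => a + x) := by
  induction l generalizing b with
  | nil => simp [cum]
  | cons x t ih =>
    simp only [cum, List.map_cons]
    have e : a + b + x = a + (b + x) := by ring
    rw [e, ih]

theorem cum_getLastD (l : List Int) (acc : Int) :
    (cum l acc).getLastD acc = acc + l.sum := by
  induction l generalizing acc with
  | nil => simp [cum]
  | cons x t ih =>
    simp only [cum, List.getLastD_cons, List.sum_cons, ih]
    ring

-- B's divide-and-conquer computes the canonical scan.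
theorem cumulativeGo_eq (seg : List Int) : cumulativeGo seg = cum seg 0 := by
  induction seg using cumulativeGo.induct with
  | case1 seg hle =>
    rw [cumulativeGo]
    simp only [hle, if_true]
    match seg, hle with
    | [], _ => simp [cum]
    | [x], _ => simp [cum]
  | case2 seg hle mid ihtake ihdrop =>
    have ih1 : cumulativeGo (seg.take (seg.length / 2)) = cum (seg.take (seg.length / 2)) 0 :=
      ihtake
    have ih2 : cumulativeGo (seg.drop (seg.length / 2)) = cum (seg.drop (seg.length / 2)) 0 :=
      ihdrop
    have hlast : (cum (seg.take (seg.length / 2)) 0).getLastD 0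
        = (seg.take (seg.length / 2)).sum := by
      simpa using cum_getLastD (seg.take (seg.length / 2)) 0
    have hshift : cum (seg.drop (seg.length / 2)) (0 + (seg.take (seg.length / 2)).sum)
        = (cum (seg.drop (seg.length / 2)) 0).map
            (fun x => (seg.take (seg.length / 2)).sum + x) := by
      have := cum_shift (seg.drop (seg.length / 2)) (seg.take (seg.length / 2)).sum 0
      simpa [add_comm] using this
    have hsplit : seg = seg.take (seg.length / 2) ++ seg.drop (seg.length / 2) := by
      simp
    rw [cumulativeGo]
    simp only [hle, if_false]
    rw [ih1, ih2, hlast]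
    conv_rhs => rw [hsplit]
    rw [cum_append, hshift]

-- Invariant of A's loop: after n steps the list is the scan of the first n
-- elements and the running total is their sum.
theorem cumulative_histogram_loop_inv (h : List Int) (n : Nat) (hn : n ≤ h.length) :
    (List.range n).foldl
      (fun (st : List Int × Int) i =>
        let running := st.2 + h.getD i 0
        (st.1 ++ [running], running))
      ([], 0)
    = (cum (h.take n) 0, (h.take n).sum) := by
  induction n with
  | zero => simp [cum]
  | succ n ih =>
    have hn' : n < h.length := hn
    rw [List.range_succ, List.foldl_append, ih (Nat.le_of_lt hn')]
    have htake : h.take (n + 1) = h.take n ++ [h[n]] := by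
      rw [List.take_add_one]
      simp [List.getElem?_eq_getElem hn']
    have hgetD : h.getD n 0 = h[n] := by
      simp [List.getD_eq_getElem?_getD, List.getElem?_eq_getElem hn']
    simp only [List.foldl_cons, List.foldl_nil, htake, cum_append, List.sum_append,
               List.sum_cons, List.sum_nil, hgetD, cum]
    simp only [zero_add, add_zero]

-- ===== VERDICT (by name: the statement is the Claim_ definition above) =====
theorem cumulative_histogram_spec : Claim_equal_cumulative_histogram := by
  intro h _
  unfold Spec_cumulative_histogram cumulative_histogram cumulative_histogram_alt
  rw [cumulative_histogram_loop_inv h h.length (le_refl _), cumulativeGo_eq]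
  simp
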